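-- pv_equiv track=rewrite | github.com/yangwei-nlp/Python-Starter | TrainFor1024/2_week33/1559_2.py | get_in_outs_based_this_row
-- ===== SOURCE A (Python) =====
-- def get_in_outs_based_this_row(row):
--     # 该行的进出点
--     in_out = {}
--     for j in range(len(row)):
--         corresponding_out = []
--         for col in range(j+1, len(row)):
--             if row[col] == row[j]:
--                 corresponding_out.append(col)
--             else:
--                 break
--         if corresponding_out:
--             in_out[j] = corresponding_out
--     return in_out
-- ===== SOURCE B (Python) =====
-- def get_in_outs_based_this_row(row):
--     # One forward pass over maximal runs of equal values instead of a
--     # per-index forward rescan (cost is bound by the output size).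
--     in_out = {}
--     n = len(row)
--     s = 0
--     while s < n:
--         e = s
--         while e + 1 < n and row[e + 1] == row[s]:
--             e += 1
--         for j in range(s, e):
--             in_out[j] = list(range(j + 1, e + 1))
--         s = e + 1
--     return in_out
-- ===== Notes on version B (the rewrite author's own statement) =====
-- stated objective: alternative
-- what changed: B decomposes the row into maximal runs of equal values in one forward pass and emits each index's out-list directly from the run boundary, instead of rescanning forward from every index; comparison count drops, but the returned dict is itself quadratic-sized on constant rows, so overall cost is output-bound (measured ~2-3x constant-factor gain, not confirmed at the largest size).
import Mathlib
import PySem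

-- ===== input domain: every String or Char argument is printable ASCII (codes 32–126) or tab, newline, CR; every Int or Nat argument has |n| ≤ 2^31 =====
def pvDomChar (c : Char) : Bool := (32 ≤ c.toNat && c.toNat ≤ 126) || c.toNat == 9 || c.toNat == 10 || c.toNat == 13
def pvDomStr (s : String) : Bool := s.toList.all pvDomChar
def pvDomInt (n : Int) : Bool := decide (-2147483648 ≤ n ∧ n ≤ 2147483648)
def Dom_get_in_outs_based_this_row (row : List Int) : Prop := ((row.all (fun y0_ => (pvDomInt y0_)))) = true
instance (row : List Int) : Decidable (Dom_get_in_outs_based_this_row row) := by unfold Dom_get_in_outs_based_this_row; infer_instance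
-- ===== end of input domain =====

-- B replaces A's per-index forward rescan by one pass over maximal runs of equal values (alternative decomposition; fewer comparisons, output-bound overall).

-- ===== PORT A =====
-- inner loop: for col in range(j+1, len(row)): if row[col] == row[j]: append col else break
-- (row[col] is always in range here; the `none` branch of pyGet? is unreachable)
def takeEqA (row : List Int) (v : Int) : List Int → List Int
  | [] => []
  | c :: cs =>
    match PySem.List.pyGet? row c with
    | some x => if x = v then c :: takeEqA row v cs else []
    | none => []

def get_in_outs_based_this_row (row : List Int) : List (Int × List Int) :=
  ((PySem.List.pyRange 0 (PySem.List.len row) 1).foldl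
      (fun d j =>
        let co := takeEqA row (PySem.List.pyGetD row j 0)
                    (PySem.List.pyRange (j + 1) (PySem.List.len row) 1)
        if co ≠ [] then d.insert j co else d)
      PySem.Dict.empty).items

-- ===== PORT B =====
-- splitRun v xs = (length of the leading run of elements equal to v, remainder)
def splitRun (v : Int) : List Int → Nat × List Int
  | [] => (0, [])
  | x :: xs => if x = v then ((splitRun v xs).1 + 1, (splitRun v xs).2) else (0, x :: xs)

theorem splitRun_snd_length (v : Int) : ∀ xs : List Int, (splitRun v xs).2.length ≤ xs.length
  | [] => le_refl _
  | x :: xs => by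
    simp only [splitRun]
    split
    · exact le_trans (splitRun_snd_length v xs) (Nat.le_succ _)
    · exact le_refl _

-- entries for a run covering absolute indices s .. s+k: every j in [s, s+k) maps to [j+1 .. s+k]
def emitRun (s k : Nat) : List (Int × List Int) :=
  (List.range' s k).map (fun (j : Nat) => ((j : Int), (List.range' (j + 1) (s + k - j)).map (fun (i : Nat) => (i : Int))))

def goB (s : Nat) : List Int → List (Int × List Int)
  | [] => []
  | x :: xs =>
    emitRun s (splitRun x xs).1 ++ goB (s + (splitRun x xs).1 + 1) (splitRun x xs).2
termination_by l => l.length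
decreasing_by exact Nat.lt_succ_of_le (splitRun_snd_length x xs)

def get_in_outs_based_this_row_alt (row : List Int) : List (Int × List Int) :=
  goB 0 row

-- ===== PRECONDITION & SPEC =====
def Spec_get_in_outs_based_this_row (row : List Int) (out : List (Int × List Int)) : Prop := out = get_in_outs_based_this_row_alt row
instance (row : List Int) (out : List (Int × List Int)) : Decidable (Spec_get_in_outs_based_this_row row out) := by unfold Spec_get_in_outs_based_this_row; infer_instance

-- ===== CLAIM (what is proved, stated in full; the proofs are below) =====
def Claim_equal_get_in_outs_based_this_row : Prop := ∀ (row : List Int), Dom_get_in_outs_based_this_row row → Spec_get_in_outs_based_this_row row (get_in_outs_based_this_row row)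

-- ===== LEMMAS AND PROOFS =====

-- characterisation of A: for each index j, its out-list is the leading equal-run of the suffix
def achar (row : List Int) : List (Int × List Int) :=
  (List.range row.length).filterMap (fun j =>
    if (splitRun (row.getD j 0) (row.drop (j + 1))).1 = 0 then none
    else some ((j : Int),
      (List.range' (j + 1) (splitRun (row.getD j 0) (row.drop (j + 1))).1).map
        (fun i : Nat => (i : Int))))

def fA (row : List Int) (j : Int) : List Int :=
  takeEqA row (PySem.List.pyGetD row j 0) (PySem.List.pyRange (j + 1) (PySem.List.len row) 1)

def shiftE (c : Nat) (p : Int × List Int) : Int × List Int :=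
  (p.1 + (c : Int), p.2.map (fun z => z + (c : Int)))

theorem splitRun_of_head_ne (v : Int) (r : List Int) (h : ∀ y ∈ r.head?, y ≠ v) :
    splitRun v r = (0, r) := by
  cases r with
  | nil => rfl
  | cons x xs =>
    have : x ≠ v := h x (by simp)
    simp [splitRun, this]

theorem splitRun_replicate_append (v : Int) (m : Nat) (r : List Int) :
    splitRun v (List.replicate m v ++ r) = (m + (splitRun v r).1, (splitRun v r).2) := by
  induction m with
  | zero => simp
  | succ m ih => simp [List.replicate_succ, splitRun, ih]; omega

theorem splitRun_append (v : Int) : ∀ xs : List Int,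
    List.replicate (splitRun v xs).1 v ++ (splitRun v xs).2 = xs := by
  intro xs; induction xs with
  | nil => rfl
  | cons x xs ih =>
    by_cases h : x = v
    · simp [splitRun, h, List.replicate_succ, ih]
    · simp [splitRun, h]

theorem splitRun_head_ne (v : Int) : ∀ (xs : List Int) (y : Int),
    y ∈ (splitRun v xs).2.head? → y ≠ v := by
  intro xs; induction xs with
  | nil => intro y hy; simp [splitRun] at hy
  | cons x xs ih =>
    intro y hy
    by_cases h : x = v
    · exact ih y (by simpa [splitRun, h] using hy)
    · simp [splitRun, h] at hy; omega

theorem takeEqA_spec (row : List Int) (v : Int) :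
    ∀ (m j : Nat), row.length - j = m → j ≤ row.length →
    takeEqA row v (PySem.List.pyRange (j : Int) ((row.length : Nat) : Int) 1)
      = (List.range' j (splitRun v (row.drop j)).1).map (fun i : Nat => (i : Int)) := by
  intro m
  induction m with
  | zero =>
    intro j hm hj
    have hj' : j = row.length := by omega
    subst hj'
    rw [PySem.List.pyRange_one_eq_nil (by omega)]
    simp [takeEqA, splitRun]
  | succ m ih =>
    intro j hm hj
    have hjn : j < row.length := by omega
    rw [PySem.List.pyRange_one_cons (by exact_mod_cast hjn)]
    have hdrop : row.drop j = row[j] :: row.drop (j + 1) := List.drop_eq_getElem_cons hjn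
    have hget : PySem.List.pyGet? row ((j : Nat) : Int) = some row[j] := by
      simp [PySem.List.pyGet?_natCast, List.getElem?_eq_getElem hjn]
    by_cases hv : row[j] = v
    · have : ((j : Int) + 1) = (((j + 1 : Nat)) : Int) := by push_cast; ring
      rw [takeEqA, hget]
      simp only [this]
      rw [ih (j + 1) (by omega) (by omega)]
      rw [hdrop, splitRun]
      simp [hv, List.range'_succ]
    · rw [takeEqA, hget]
      simp only [hv]
      rw [hdrop, splitRun]
      simp [hv]

theorem items_foldl_insert_if (f : Int → List Int) :
    ∀ (l : List Int) (d : PySem.Dict Int (List Int)),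
    (∀ a ∈ l, d.contains a = false) → l.Nodup →
    (l.foldl (fun d j => if f j ≠ [] then d.insert j (f j) else d) d).items
      = d.items ++ l.filterMap (fun j => if f j ≠ [] then some (j, f j) else none) := by
  intro l
  induction l with
  | nil => intro d _ _; simp
  | cons a l ih =>
    intro d hfresh hnd
    by_cases h : f a = []
    · rw [List.foldl_cons]
      simp only [h, ne_eq, not_true_eq_false, if_false, List.filterMap_cons]
      exact ih d (fun b hb => hfresh b (List.mem_cons_of_mem a hb)) (List.Nodup.of_cons hnd)
    · rw [List.foldl_cons]
      simp only [h, ne_eq, not_false_eq_true, if_true, List.filterMap_cons]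
      rw [ih (d.insert a (f a)) ?_ (List.Nodup.of_cons hnd)]
      · rw [PySem.Dict.items_insert_of_not_contains _ _ (hfresh a (List.mem_cons_self ..))]
        simp
      · intro b hb
        rw [PySem.Dict.contains_insert]
        have hba : b ≠ a := by
          rcases List.nodup_cons.mp hnd with ⟨ha, _⟩
          intro e; exact ha (e ▸ hb)
        simp [hba, hfresh b (List.mem_cons_of_mem a hb)]

theorem fA_spec (row : List Int) (j : Nat) (hj : j < row.length) :
    fA row (j : Int)
      = (List.range' (j + 1) (splitRun (row.getD j 0) (row.drop (j + 1))).1).map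
          (fun i : Nat => (i : Int)) := by
  unfold fA
  have h1 : PySem.List.pyGetD row ((j : Nat) : Int) 0 = row.getD j 0 := PySem.List.pyGetD_natCast ..
  have h2 : ((j : Int) + 1) = (((j + 1 : Nat)) : Int) := by push_cast; ring
  rw [h1, h2, PySem.List.len_eq]
  exact takeEqA_spec row (row.getD j 0) (row.length - (j + 1)) (j + 1) rfl (by omega)

theorem A_eq_achar (row : List Int) : get_in_outs_based_this_row row = achar row := by
  unfold get_in_outs_based_this_row
  rw [show (fun (d : PySem.Dict Int (List Int)) (j : Int) =>
        let co := takeEqA row (PySem.List.pyGetD row j 0)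
                    (PySem.List.pyRange (j + 1) (PySem.List.len row) 1)
        if co ≠ [] then d.insert j co else d)
      = (fun (d : PySem.Dict Int (List Int)) (j : Int) =>
          if fA row j ≠ [] then d.insert j (fA row j) else d) from rfl]
  rw [items_foldl_insert_if (fA row) _ PySem.Dict.empty (by simp) (PySem.List.nodup_pyRange_one _ _)]
  rw [PySem.List.len_eq, PySem.List.pyRange_zero_natCast, List.filterMap_map]
  simp only [PySem.Dict.empty, List.nil_append]
  unfold achar
  apply List.filterMap_congr
  intro j hj
  have hjn : j < row.length := List.mem_range.mp hj
  simp only [Function.comp_apply, fA_spec row j hjn]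
  by_cases hk : (splitRun (row.getD j 0) (row.drop (j + 1))).1 = 0
  · simp
  · simp [List.range'_eq_nil_iff]

theorem castRange'_shift (a m s : Nat) :
    (List.range' (s + a) m).map (fun i : Nat => (i : Int))
      = ((List.range' a m).map (fun i : Nat => (i : Int))).map (fun z => z + (s : Int)) := by
  rw [List.range'_eq_map_range, List.range'_eq_map_range]
  simp only [List.map_map]
  apply List.map_congr_left
  intro i _
  simp only [Function.comp_apply]
  push_cast
  ring

theorem emitRun_shift (s k : Nat) : emitRun s k = (emitRun 0 k).map (shiftE s) := by
  unfold emitRun shiftE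
  rw [List.range'_eq_map_range, List.range'_eq_map_range]
  simp only [List.map_map]
  apply List.map_congr_left
  intro j0 _
  simp only [Function.comp_apply]
  simp only [Prod.mk.injEq]
  refine ⟨by push_cast; ring, ?_⟩
  have h1 : s + k - (s + j0) = 0 + k - (0 + j0) := by omega
  have h2 : s + j0 + 1 = s + (0 + j0 + 1) := by omega
  rw [h1, h2, castRange'_shift]

theorem shiftE_shiftE (s c : Nat) (p : Int × List Int) :
    shiftE s (shiftE c p) = shiftE (s + c) p := by
  unfold shiftE
  simp only [Prod.mk.injEq]
  refine ⟨by push_cast; ring, ?_⟩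
  · simp only [List.map_map]
    apply List.map_congr_left
    intro z _
    simp only [Function.comp_apply]
    push_cast
    ring

theorem goB_shift : ∀ (n : Nat) (r : List Int), r.length = n → ∀ s : Nat,
    goB s r = (goB 0 r).map (shiftE s) := by
  intro n
  induction n using Nat.strong_induction_on with
  | _ n ih =>
    intro r hr s
    cases r with
    | nil => simp [goB]
    | cons x xs =>
      rw [goB, goB, List.map_append, ← emitRun_shift]
      congr 1
      have h2 := splitRun_snd_length x xs
      have hr' : xs.length + 1 = n := by simpa using hr
      rw [ih ((splitRun x xs).2.length) (by omega) _ rfl (s + (splitRun x xs).1 + 1),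
          ih ((splitRun x xs).2.length) (by omega) _ rfl (0 + (splitRun x xs).1 + 1),
          List.map_map]
      apply List.map_congr_left
      intro p _
      rw [Function.comp_apply, shiftE_shiftE]
      congr 1
      omega

theorem achar_replicate_append (v : Int) (k : Nat) (r0 : List Int)
    (hhead : ∀ y ∈ r0.head?, y ≠ v) :
    achar (List.replicate (k + 1) v ++ r0) = emitRun 0 k ++ (achar r0).map (shiftE (k + 1)) := by
  have hsp : ∀ j : Nat, j < k + 1 →
      splitRun v ((List.replicate (k + 1) v ++ r0).drop (j + 1)) = (k - j, r0) := by
    intro j hj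
    rw [List.drop_append_of_le_length (by simp; omega), List.drop_replicate,
        splitRun_replicate_append, splitRun_of_head_ne v r0 hhead]
    simp
  have hgetl : ∀ j : Nat, j < k + 1 → (List.replicate (k + 1) v ++ r0).getD j 0 = v := by
    intro j hj
    rw [List.getD_eq_getElem?_getD, List.getElem?_append_left (by simpa using hj)]
    simp [hj]

  have hgetr : ∀ i : Nat, (List.replicate (k + 1) v ++ r0).getD (k + 1 + i) 0 = r0.getD i 0 := by
    intro i
    rw [List.getD_eq_getElem?_getD, List.getElem?_append_right (by simp)]
    simp [List.getD_eq_getElem?_getD]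
  have hdropr : ∀ i : Nat,
      (List.replicate (k + 1) v ++ r0).drop (k + 1 + i + 1) = r0.drop (i + 1) := by
    intro i
    rw [List.drop_append, List.drop_replicate,
        show k + 1 + i + 1 - (List.replicate (k + 1) v).length = i + 1 from by
          simp only [List.length_replicate]; omega,
        show k + 1 - (k + 1 + i + 1) = 0 from by omega]
    simp
  unfold achar
  rw [show (List.replicate (k + 1) v ++ r0).length = (k + 1) + r0.length by simp,
      List.range_add, List.filterMap_append, List.filterMap_map]
  congr 1
  · -- first run: indices 0 .. k
    rw [List.range_succ, List.filterMap_append]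
    simp only [List.filterMap_cons, List.filterMap_nil]
    rw [hgetl k (by omega), hsp k (by omega)]
    simp only [Nat.sub_self, reduceIte, List.append_nil]
    rw [List.filterMap_congr (g := fun (j : Nat) => some ((j : Int),
          (List.range' (j + 1) (k - j)).map (fun i : Nat => (i : Int)))) ?_]
    · rw [show (fun j : Nat => some ((j : Int),
            (List.range' (j + 1) (k - j)).map (fun i : Nat => (i : Int))))
          = some ∘ (fun j : Nat => ((j : Int),
            (List.range' (j + 1) (k - j)).map (fun i : Nat => (i : Int)))) from rfl,
          List.filterMap_eq_map]
      unfold emitRun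
      rw [← List.range_eq_range']
      apply List.map_congr_left
      intro j hj
      simp
    · intro j hj
      have hjk : j < k := List.mem_range.mp hj
      rw [hgetl j (by omega), hsp j (by omega)]
      simp only
      rw [if_neg (by omega)]
  · -- the rest: indices k+1 .. k+r0.length, shifted copies of achar r0
    rw [List.map_filterMap]
    apply List.filterMap_congr
    intro i hi
    simp only [Function.comp_apply]
    rw [hgetr i, hdropr i]
    split_ifs with hk
    · simp
    · simp only [Option.map_some]
      unfold shiftE
      simp only [Option.some.injEq, Prod.mk.injEq]
      refine ⟨by push_cast; ring, ?_⟩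
      rw [show k + 1 + i + 1 = (k + 1) + (i + 1) by omega, castRange'_shift]

theorem achar_eq_goB : ∀ (n : Nat) (r : List Int), r.length = n → achar r = goB 0 r := by
  intro n
  induction n using Nat.strong_induction_on with
  | _ n ih =>
    intro r hr
    cases r with
    | nil => simp [achar, goB]
    | cons x xs =>
      have hxs : List.replicate (splitRun x xs).1 x ++ (splitRun x xs).2 = xs :=
        splitRun_append x xs
      have hlen := splitRun_snd_length x xs
      have hr' : xs.length + 1 = n := by simpa using hr
      rw [goB, goB_shift ((splitRun x xs).2.length) _ rfl,
          ← ih ((splitRun x xs).2.length) (by omega) _ rfl]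
      rw [show x :: xs = List.replicate ((splitRun x xs).1 + 1) x ++ (splitRun x xs).2 by
            rw [List.replicate_succ, List.cons_append, hxs]]
      rw [achar_replicate_append x (splitRun x xs).1 (splitRun x xs).2
            (splitRun_head_ne x xs)]
      norm_num

theorem main_eq : ∀ row : List Int, get_in_outs_based_this_row row = get_in_outs_based_this_row_alt row := by
  intro row
  rw [A_eq_achar, get_in_outs_based_this_row_alt, achar_eq_goB row.length row rfl]

-- ===== VERDICT (by name: the statement is the Claim_ definition above) =====
theorem get_in_outs_based_this_row_spec : Claim_equal_get_in_outs_based_this_row := by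
  intro row _
  exact main_eq row
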